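-- pv_equiv track=rewrite | github.com/tupkalenkodi/dbfbd_spark_hir_graphs_identification | python_scripts/pyspark_process.py | is_highly_irregular
-- ===== SOURCE A (Python) =====
-- def compute_neighbor_degrees(edges, order):
--     if not edges:
--         return []
--
--     adj_list = [[] for _ in range(order)]
--     degree = [0] * order
--
--     # Build adjacency list and compute degrees
--     for u, v in edges:
--         adj_list[u].append(v)
--         adj_list[v].append(u)
--         degree[u] += 1
--         degree[v] += 1
--
--     # Compute neighbor degrees for each vertex
--     neighbor_degrees = []
--     for v in range(order):
--         if adj_list[v]:  # Only compute if vertex has neighbors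
--             neighbors_deg = [degree[u] for u in adj_list[v]]
--             neighbor_degrees.append(neighbors_deg)
--         else:
--             neighbor_degrees.append([])  # Isolated vertex
--
--     return neighbor_degrees
--
-- def is_highly_irregular(edges, order):
--     if not edges:
--         return False
--
--     # First compute neighbor degrees
--     neighbor_degrees_list = compute_neighbor_degrees(edges, order)
--
--     if not neighbor_degrees_list:
--         return False
--
--     # Check if highly irregular
--     for vertex_degrees in neighbor_degrees_list:
--         if not vertex_degrees:  # Isolated vertex, skip
--             continue
--         # IF ANY VERTEX HAS NEIGHBORS WITH DUPLICATE DEGREES, NOT HIGHLY IRREGULAR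
--         if len(vertex_degrees) != len(set(vertex_degrees)):
--             return False
--     return True
-- ===== SOURCE B (Python) =====
-- def is_highly_irregular(edges, order):
--     if not edges:
--         return False
--
--     degree = [0] * order
--     for u, v in edges:
--         degree[u] += 1
--         degree[v] += 1
--
--     # seen[w] = set of neighbor degrees already met at vertex w
--     seen = [set() for _ in range(order)]
--     for u, v in edges:
--         if degree[v] in seen[u]:
--             return False
--         seen[u].add(degree[v])
--         if degree[u] in seen[v]:
--             return False
--         seen[v].add(degree[u])
--     return True
-- ===== Notes on version B (the rewrite author's own statement) =====
-- stated objective: alternative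
-- what changed: B drops A's adjacency-list and neighbor-degree-list construction entirely: it computes degrees in one edge pass and then detects duplicate neighbor degrees in a second edge pass with per-vertex sets of already-seen degrees, exiting early on the first duplicate.
import Mathlib
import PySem

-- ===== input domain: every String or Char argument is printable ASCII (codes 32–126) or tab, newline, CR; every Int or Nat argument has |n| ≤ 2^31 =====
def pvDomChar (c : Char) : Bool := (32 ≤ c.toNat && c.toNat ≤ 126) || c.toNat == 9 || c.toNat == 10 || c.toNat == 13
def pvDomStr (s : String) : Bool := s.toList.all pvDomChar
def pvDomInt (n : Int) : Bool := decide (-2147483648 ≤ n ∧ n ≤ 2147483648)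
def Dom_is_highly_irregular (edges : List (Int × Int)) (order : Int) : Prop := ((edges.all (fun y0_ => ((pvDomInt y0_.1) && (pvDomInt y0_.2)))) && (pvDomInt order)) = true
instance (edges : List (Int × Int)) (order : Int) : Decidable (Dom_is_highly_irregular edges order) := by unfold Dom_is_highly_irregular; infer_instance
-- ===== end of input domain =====

-- B replaces A's adjacency-list + neighbor-degree-list construction by a degree pass over
-- the edges followed by a duplicate-detecting pass maintaining per-vertex sets of seen
-- neighbor degrees, with early exit (objective: alternative decomposition, same asymptotics).

-- ===== PORT A =====
-- degree[u] += 1; degree[v] += 1 (the two lines both Pythons share)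
def degStep (d : List Int) (e : Int × Int) : List Int :=
  let d1 := PySem.List.pySetD d e.1 (PySem.List.pyGetD d e.1 0 + 1)
  PySem.List.pySetD d1 e.2 (PySem.List.pyGetD d1 e.2 0 + 1)

-- body of A's edge loop: adj_list[u].append(v); adj_list[v].append(u); degree updates
def cndStep (st : List (List Int) × List Int) (e : Int × Int) : List (List Int) × List Int :=
  let adj1 := PySem.List.pySetD st.1 e.1 (PySem.List.pyGetD st.1 e.1 [] ++ [e.2])
  let adj2 := PySem.List.pySetD adj1 e.2 (PySem.List.pyGetD adj1 e.2 [] ++ [e.1])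
  (adj2, degStep st.2 e)

def compute_neighbor_degrees (edges : List (Int × Int)) (order : Int) : List (List Int) :=
  if edges = [] then []
  else
    let st := edges.foldl cndStep (List.replicate order.toNat [], List.replicate order.toNat 0)
    (PySem.List.pyRange 0 order 1).map (fun v =>
      let av := PySem.List.pyGetD st.1 v []
      if av ≠ [] then av.map (fun u => PySem.List.pyGetD st.2 u 0) else [])

def is_highly_irregular (edges : List (Int × Int)) (order : Int) : Bool :=
  if edges = [] then false
  else
    let ndl := compute_neighbor_degrees edges order
    if ndl = [] then false
    else ndl.all (fun vd => if vd = [] then true else vd.length == (PySem.Set.ofList vd).length)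

-- ===== PORT B =====
-- second pass of B: for (u,v) check degree[v] against seen[u], then degree[u] against seen[v]
def bLoop (deg : List Int) (seen : List (PySem.Set Int)) : List (Int × Int) → Bool
  | [] => true
  | e :: rest =>
    let dv := PySem.List.pyGetD deg e.2 0
    let su := PySem.List.pyGetD seen e.1 []
    if PySem.Set.contains su dv then false
    else
      let seen1 := PySem.List.pySetD seen e.1 (PySem.Set.add su dv)
      let du := PySem.List.pyGetD deg e.1 0
      let sv := PySem.List.pyGetD seen1 e.2 []
      if PySem.Set.contains sv du then false
      else bLoop deg (PySem.List.pySetD seen1 e.2 (PySem.Set.add sv du)) rest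

def is_highly_irregular_alt (edges : List (Int × Int)) (order : Int) : Bool :=
  if edges = [] then false
  else
    let deg := edges.foldl degStep (List.replicate order.toNat 0)
    bLoop deg (List.replicate order.toNat PySem.Set.empty) edges

-- ===== PRECONDITION & SPEC =====
-- Pre_ excludes exactly the inputs on which A raises IndexError: a nonempty edge list
-- containing an endpoint outside the Python index range [-order, order) of the
-- order-long adjacency/degree lists.
def Pre_is_highly_irregular (edges : List (Int × Int)) (order : Int) : Prop :=
  ∀ e ∈ edges, -order ≤ e.1 ∧ e.1 < order ∧ -order ≤ e.2 ∧ e.2 < order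
instance (edges : List (Int × Int)) (order : Int) : Decidable (Pre_is_highly_irregular edges order) := by unfold Pre_is_highly_irregular; infer_instance

def pvWitness_is_highly_irregular : (List (Int × Int)) × Int := ([(0, 1), (0, 2)], 3)

def Spec_is_highly_irregular (edges : List (Int × Int)) (order : Int) (out : Bool) : Prop := out = is_highly_irregular_alt edges order
instance (edges : List (Int × Int)) (order : Int) (out : Bool) : Decidable (Spec_is_highly_irregular edges order out) := by unfold Spec_is_highly_irregular; infer_instance

-- ===== CLAIM (what is proved, stated in full; the proofs are below) =====
def Claim_equal_is_highly_irregular : Prop := ∀ (edges : List (Int × Int)) (order : Int), Dom_is_highly_irregular edges order → Pre_is_highly_irregular edges order → Spec_is_highly_irregular edges order (is_highly_irregular edges order)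

-- ===== LEMMAS AND PROOFS =====

-- the Nat index a Python index i denotes in a list of length n (meaningful under InRange)
def pvIdx (n : Nat) (i : Int) : Nat := if 0 ≤ i then i.toNat else n - (-i).toNat

-- raw partner entries appended at vertex slot j while scanning the edges
def rawEnts (n : Nat) (j : Nat) : List (Int × Int) → List Int
  | [] => []
  | e :: es =>
      ((if pvIdx n e.1 = j then [e.2] else []) ++ (if pvIdx n e.2 = j then [e.1] else []))
        ++ rawEnts n j es

-- the neighbor-degree entries of vertex slot j
def entsF (n : Nat) (deg : List Int) (j : Nat) (es : List (Int × Int)) : List Int :=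
  (rawEnts n j es).map (fun u => deg.getD (pvIdx n u) 0)

def EdgeOk (n : Nat) (e : Int × Int) : Prop :=
  PySem.Raise.InRange n e.1 ∧ PySem.Raise.InRange n e.2

lemma pvIdx_lt {n : Nat} {i : Int} (h : PySem.Raise.InRange n i) : pvIdx n i < n := by
  rcases h with ⟨h1, h2⟩; unfold pvIdx; split <;> omega

lemma pyGetD_pv {α : Type} (xs : List α) (i : Int) (d : α)
    (h : PySem.Raise.InRange xs.length i) :
    PySem.List.pyGetD xs i d = xs.getD (pvIdx xs.length i) d := by
  rcases h with ⟨h1, h2⟩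
  simp only [PySem.List.pyGetD, PySem.List.pyGet?, PySem.List.pyIdx?, pvIdx]
  by_cases hi : 0 ≤ i
  · rw [if_pos hi, if_pos hi, if_pos h2]; simp [List.getD]
  · rw [if_neg hi, if_neg hi, if_pos h1]; simp [List.getD]

lemma pySetD_pv {α : Type} (xs : List α) (i : Int) (v : α)
    (h : PySem.Raise.InRange xs.length i) :
    PySem.List.pySetD xs i v = xs.set (pvIdx xs.length i) v := by
  rcases h with ⟨h1, h2⟩
  simp only [PySem.List.pySetD, PySem.List.pySet?, PySem.List.pyIdx?, pvIdx]
  by_cases hi : 0 ≤ i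
  · rw [if_pos hi, if_pos hi, if_pos h2]; simp
  · rw [if_neg hi, if_neg hi, if_pos h1]; simp

lemma length_degStep (d : List Int) (e : Int × Int) : (degStep d e).length = d.length := by
  simp [degStep, PySem.List.length_pySetD]

lemma length_foldl_degStep (es : List (Int × Int)) (d : List Int) :
    (es.foldl degStep d).length = d.length := by
  induction es generalizing d with
  | nil => rfl
  | cons e es ih => rw [List.foldl_cons, ih, length_degStep]

-- the adjacency half of A's loop body
def adjStep (adj : List (List Int)) (e : Int × Int) : List (List Int) :=
  let adj1 := PySem.List.pySetD adj e.1 (PySem.List.pyGetD adj e.1 [] ++ [e.2])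
  PySem.List.pySetD adj1 e.2 (PySem.List.pyGetD adj1 e.2 [] ++ [e.1])

lemma cndStep_split (st : List (List Int) × List Int) (e : Int × Int) :
    cndStep st e = (adjStep st.1 e, degStep st.2 e) := rfl

lemma foldl_cndStep_split (es : List (Int × Int)) (adj : List (List Int)) (d : List Int) :
    es.foldl cndStep (adj, d) = (es.foldl adjStep adj, es.foldl degStep d) := by
  induction es generalizing adj d with
  | nil => rfl
  | cons e es ih => rw [List.foldl_cons, cndStep_split, ih]; rfl

lemma length_adjStep (adj : List (List Int)) (e : Int × Int) :
    (adjStep adj e).length = adj.length := by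
  simp [adjStep, PySem.List.length_pySetD]

lemma getD_set_nest {α : Type} (l : List α) (a : Nat) (w : α) (j : Nat) (d : α)
    (hj : j < l.length) (_ha : a < l.length) :
    (l.set a w).getD j d = if a = j then w else l.getD j d := by
  rw [List.getD_eq_getElem _ _ (by simpa using hj), List.getElem_set,
      List.getD_eq_getElem _ _ hj]

lemma adjStep_getD (adj : List (List Int)) (e : Int × Int)
    (he : EdgeOk adj.length e) (j : Nat) (hj : j < adj.length) :
    (adjStep adj e).getD j [] =
      adj.getD j [] ++ ((if pvIdx adj.length e.1 = j then [e.2] else [])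
        ++ (if pvIdx adj.length e.2 = j then [e.1] else [])) := by
  obtain ⟨h1, h2⟩ := he
  unfold adjStep
  rw [pySetD_pv _ _ _ h1, pyGetD_pv _ _ _ h1]
  have ha := pvIdx_lt h1
  have hb := pvIdx_lt h2
  set a := pvIdx adj.length e.1 with hadef
  set b := pvIdx adj.length e.2 with hbdef
  set adj1 := adj.set a (adj.getD a [] ++ [e.2]) with hadj1
  have hlen : adj1.length = adj.length := by simp [hadj1]
  rw [pySetD_pv _ _ _ (by rw [hlen]; exact h2), pyGetD_pv _ _ _ (by rw [hlen]; exact h2),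
      hlen, ← hbdef]
  rw [getD_set_nest _ _ _ _ _ (by omega) (by omega)]
  rw [hadj1, getD_set_nest _ _ _ _ _ (by omega) (by omega),
      getD_set_nest _ _ _ _ _ (by omega) (by omega)]
  by_cases hbj : b = j <;> by_cases haj : a = j <;>
    simp [hbj, haj, List.getD]

lemma foldl_adjStep_getD (es : List (Int × Int)) (adj : List (List Int))
    (hok : ∀ e ∈ es, EdgeOk adj.length e) (j : Nat) (hj : j < adj.length) :
    (es.foldl adjStep adj).getD j [] = adj.getD j [] ++ rawEnts adj.length j es := by
  induction es generalizing adj with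
  | nil => simp [rawEnts]
  | cons e es ih =>
    rw [List.foldl_cons]
    have hlen := length_adjStep adj e
    have := ih (adjStep adj e) (by rw [hlen]; intro x hx; exact hok x (List.mem_cons_of_mem _ hx)) (by rw [hlen]; exact hj)
    rw [this, hlen, adjStep_getD adj e (hok e (List.mem_cons_self)) j hj]
    simp [rawEnts, List.append_assoc]

lemma mem_rawEnts {n j : Nat} {es : List (Int × Int)} {x : Int}
    (hx : x ∈ rawEnts n j es) : ∃ e ∈ es, x = e.1 ∨ x = e.2 := by
  induction es with
  | nil => simp [rawEnts] at hx
  | cons e es ih =>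
    simp only [rawEnts, List.mem_append] at hx
    rcases hx with (hx | hx) | hx
    · split at hx <;> simp_all
    · split at hx <;> simp_all
    · obtain ⟨e', he', h⟩ := ih hx
      exact ⟨e', List.mem_cons_of_mem _ he', h⟩

-- len(vd) == len(set(vd)) is exactly Nodup
lemma len_ofList_eq_iff (l : List Int) :
    (l.length == (PySem.Set.ofList l).length) = true ↔ l.Nodup := by
  rw [beq_iff_eq]
  have hperm : (PySem.Set.ofList l).Perm l.dedup := by
    rw [List.perm_ext_iff_of_nodup (PySem.Set.nodup_ofList l) l.nodup_dedup]
    intro a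
    rw [PySem.Set.mem_ofList, List.mem_dedup]
  have hlen : (PySem.Set.ofList l).length = l.dedup.length := hperm.length_eq
  rw [hlen]
  constructor
  · intro h
    rw [← List.dedup_eq_self]
    exact (List.dedup_sublist l).eq_of_length h.symm
  · intro h
    rw [List.dedup_eq_self.mpr h]

lemma entsF_cons (n : Nat) (deg : List Int) (j : Nat) (e : Int × Int) (es : List (Int × Int)) :
    entsF n deg j (e :: es) =
      ((if pvIdx n e.1 = j then [deg.getD (pvIdx n e.2) 0] else [])
        ++ (if pvIdx n e.2 = j then [deg.getD (pvIdx n e.1) 0] else []))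
        ++ entsF n deg j es := by
  unfold entsF
  simp only [rawEnts]
  rw [List.map_append, List.map_append]
  congr 1
  congr 1 <;> split <;> simp

-- two occurrences of the same value across an append contradict Nodup
lemma nodup_absurd2 {s t : List Int} {x : Int} (hx : x ∈ s) (hxt : x ∈ t)
    (h : (s ++ t).Nodup) : False := by
  rw [List.nodup_append] at h
  exact h.2.2 x hx x hxt rfl

-- B's loop returns true iff every per-vertex seen-set stays duplicate-free through es
lemma bLoop_iff (n : Nat) (deg : List Int) (hd : deg.length = n) :
    ∀ es : List (Int × Int), (∀ e ∈ es, EdgeOk n e) →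
    ∀ seen : List (PySem.Set Int), seen.length = n →
    (∀ j, j < n → (seen.getD j []).Nodup) →
    (bLoop deg seen es = true ↔
      ∀ j, j < n → ((seen.getD j []) ++ entsF n deg j es).Nodup) := by
  intro es
  induction es with
  | nil =>
    intro _ seen hs hnd
    simp only [bLoop, entsF, rawEnts, List.map_nil, List.append_nil, true_iff]
    intro j hj; exact hnd j hj
  | cons e es ih =>
    intro hok seen hs hnd
    obtain ⟨h1, h2⟩ := hok e (List.mem_cons_self)
    have hok' : ∀ e' ∈ es, EdgeOk n e' := fun e' he' => hok e' (List.mem_cons_of_mem _ he')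
    have ha := pvIdx_lt h1
    have hb := pvIdx_lt h2
    set a := pvIdx n e.1 with hadef
    set b := pvIdx n e.2 with hbdef
    have hdu : PySem.List.pyGetD deg e.1 0 = deg.getD a 0 := by
      rw [pyGetD_pv _ _ _ (hd ▸ h1), hd]
    have hdv : PySem.List.pyGetD deg e.2 0 = deg.getD b 0 := by
      rw [pyGetD_pv _ _ _ (hd ▸ h2), hd]
    set du := deg.getD a 0 with hdudef
    set dv := deg.getD b 0 with hdvdef
    have hsu : PySem.List.pyGetD seen e.1 [] = seen.getD a [] := by
      rw [pyGetD_pv _ _ _ (hs ▸ h1), hs]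
    show (bLoop deg seen (e :: es) = true) ↔ _
    rw [bLoop]
    simp only [hdu, hdv, hsu]
    by_cases hc1 : dv ∈ seen.getD a []
    · rw [if_pos (by rw [PySem.Set.contains_iff]; exact hc1)]
      refine iff_of_false (by simp) (fun hP => ?_)
      have hnodup := hP a ha
      rw [entsF_cons, ← hadef, ← hbdef, ← hdudef, ← hdvdef, if_pos rfl] at hnodup
      rw [List.append_assoc] at hnodup
      exact nodup_absurd2 hc1 (by simp) hnodup
    · rw [if_neg (by rw [PySem.Set.contains_iff]; exact hc1)]
      have hadd1 : PySem.Set.add (seen.getD a []) dv = seen.getD a [] ++ [dv] :=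
        PySem.Set.add_of_not_mem hc1
      have hset1 : PySem.List.pySetD seen e.1 (PySem.Set.add (seen.getD a []) dv)
          = seen.set a (seen.getD a [] ++ [dv]) := by
        rw [pySetD_pv _ _ _ (hs ▸ h1), hs, hadd1]
      rw [hset1]
      set seen1 := seen.set a (seen.getD a [] ++ [dv]) with hseen1
      have hs1 : seen1.length = n := by simp [hseen1, hs]
      have hseen1getD : ∀ j, j < n → seen1.getD j [] =
          seen.getD j [] ++ (if a = j then [dv] else []) := by
        intro j hj
        rw [hseen1, getD_set_nest _ _ _ _ _ (by omega) (by omega)]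
        by_cases haj : a = j
        · rw [if_pos haj, if_pos haj, haj]
        · rw [if_neg haj, if_neg haj, List.append_nil]
      have hsv : PySem.List.pyGetD seen1 e.2 [] = seen1.getD b [] := by
        rw [pyGetD_pv _ _ _ (hs1 ▸ h2), hs1]
      rw [hsv]
      by_cases hc2 : du ∈ seen1.getD b []
      · rw [if_pos (by rw [PySem.Set.contains_iff]; exact hc2)]
        refine iff_of_false (by simp) (fun hP => ?_)
        have hnodup := hP b hb
        rw [entsF_cons, ← hadef, ← hbdef, ← hdudef, ← hdvdef, if_pos rfl] at hnodup
        rw [hseen1getD b hb] at hc2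
        by_cases hab : a = b
        · rw [if_pos hab] at hc2 hnodup
          rw [List.mem_append] at hc2
          rcases hc2 with hc2 | hc2
          · rw [List.append_assoc] at hnodup
            exact nodup_absurd2 hc2 (by simp) hnodup
          · simp only [List.mem_singleton] at hc2
            rw [List.nodup_append] at hnodup
            have h21 := hnodup.2.1
            rw [hc2] at h21
            simp at h21
        · rw [if_neg hab] at hc2 hnodup
          simp only [List.append_nil] at hc2
          rw [List.nil_append] at hnodup
          exact nodup_absurd2 hc2 (by simp) hnodup
      · rw [if_neg (by rw [PySem.Set.contains_iff]; exact hc2)]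
        have hadd2 : PySem.Set.add (seen1.getD b []) du = seen1.getD b [] ++ [du] :=
          PySem.Set.add_of_not_mem hc2
        have hset2 : PySem.List.pySetD seen1 e.2 (PySem.Set.add (seen1.getD b []) du)
            = seen1.set b (seen1.getD b [] ++ [du]) := by
          rw [pySetD_pv _ _ _ (hs1 ▸ h2), hs1, hadd2]
        rw [hset2]
        set seen2 := seen1.set b (seen1.getD b [] ++ [du]) with hseen2
        have hs2 : seen2.length = n := by simp [hseen2, hs1]
        have hseen2getD : ∀ j, j < n → seen2.getD j [] =
            seen.getD j [] ++ ((if a = j then [dv] else []) ++ (if b = j then [du] else [])) := by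
          intro j hj
          rw [hseen2, getD_set_nest _ _ _ _ _ (by omega) (by omega)]
          by_cases hbj : b = j
          · rw [if_pos hbj, if_pos hbj, hseen1getD b hb, hbj, List.append_assoc]
          · rw [if_neg hbj, if_neg hbj, hseen1getD j hj, List.append_nil]
        have hnd2 : ∀ j, j < n → (seen2.getD j []).Nodup := by
          intro j hj
          rw [hseen2getD j hj]
          by_cases haj : a = j
          · by_cases hbj : b = j
            · rw [if_pos haj, if_pos hbj]
              have hdunotin : du ∉ seen.getD j [] ++ [dv] := by
                intro hmem
                apply hc2
                rw [hseen1getD b hb, if_pos (haj ▸ hbj ▸ rfl : a = b), ← hbj] at *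
                exact hmem
              rw [← List.append_assoc]
              rw [List.nodup_append]
              refine ⟨?_, by simp, ?_⟩
              · rw [List.nodup_append]
                refine ⟨hnd j hj, by simp, ?_⟩
                intro x hx y hy hxy
                rw [List.mem_singleton] at hy
                exact hc1 (by rw [haj]; rw [hxy, hy] at hx; exact hx)
              · intro x hx y hy hxy
                rw [List.mem_singleton] at hy
                exact hdunotin (by rw [hxy, hy] at hx; exact hx)
            · rw [if_pos haj, if_neg hbj, List.append_nil, List.nodup_append]
              refine ⟨hnd j hj, by simp, ?_⟩
              intro x hx y hy hxy
              rw [List.mem_singleton] at hy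
              exact hc1 (by rw [haj]; rw [hxy, hy] at hx; exact hx)
          · by_cases hbj : b = j
            · rw [if_neg haj, if_pos hbj, List.nil_append, List.nodup_append]
              refine ⟨hnd j hj, by simp, ?_⟩
              intro x hx y hy hxy
              rw [List.mem_singleton] at hy
              apply hc2
              rw [hseen1getD b hb, if_neg (fun hab => haj (hab.trans hbj))]
              rw [List.append_nil, hbj]
              rw [hxy, hy] at hx; exact hx
            · rw [if_neg haj, if_neg hbj, List.append_nil, List.append_nil]
              exact hnd j hj
        rw [ih hok' seen2 hs2 hnd2]
        constructor
        · intro h j hj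
          have := h j hj
          rw [hseen2getD j hj] at this
          rw [entsF_cons, ← hadef, ← hbdef, ← hdudef, ← hdvdef]
          simp only [List.append_assoc] at this ⊢
          exact this
        · intro h j hj
          have := h j hj
          rw [entsF_cons, ← hadef, ← hbdef, ← hdudef, ← hdvdef] at this
          rw [hseen2getD j hj]
          simp only [List.append_assoc] at this ⊢
          exact this

-- ===== VERDICT (by name: the statement is the Claim_ definition above) =====
theorem is_highly_irregular_spec : Claim_equal_is_highly_irregular := by
  intro edges order _ hpre
  unfold Spec_is_highly_irregular
  by_cases hne : edges = []
  · subst hne; simp [is_highly_irregular, is_highly_irregular_alt]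
  · set n := order.toNat with hn
    have hok : ∀ e ∈ edges, EdgeOk n e := by
      intro e he
      obtain ⟨p1, p2, p3, p4⟩ := hpre e he
      have hord : (0:Int) < order := by omega
      constructor <;> constructor <;> simp [hn] <;> omega
    have hnpos : 0 < n := by
      obtain ⟨e, he⟩ := List.exists_mem_of_ne_nil edges hne
      exact lt_of_le_of_lt (Nat.zero_le _) (pvIdx_lt (hok e he).1)
    have hordn : order = (n : Int) := by rw [hn]; omega
    -- the common degree list
    set deg := edges.foldl degStep (List.replicate n 0) with hdeg
    have hdlen : deg.length = n := by rw [hdeg, length_foldl_degStep, List.length_replicate]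
    have hadjlen : ∀ j, j < n → (edges.foldl adjStep (List.replicate n ([] : List Int))).getD j [] = rawEnts n j edges := by
      intro j hj
      have := foldl_adjStep_getD edges (List.replicate n ([] : List Int))
        (by rw [List.length_replicate]; exact hok) j (by rw [List.length_replicate]; exact hj)
      rw [List.length_replicate] at this
      rw [this, List.getD_eq_getElem _ _ (by simp; exact hj)]
      simp
    -- the per-vertex entries: A's neighbor-degree lists
    have hcnd : compute_neighbor_degrees edges order
        = (List.range n).map (fun j => entsF n deg j edges) := by
      unfold compute_neighbor_degrees
      rw [if_neg hne]
      simp only [foldl_cndStep_split, ← hn, ← hdeg]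
      rw [hordn, PySem.List.pyRange_zero_natCast n, List.map_map]
      apply List.map_congr_left
      intro j hj
      rw [List.mem_range] at hj
      simp only [Function.comp]
      rw [PySem.List.pyGetD_natCast, hadjlen j hj]
      have hmapeq : (rawEnts n j edges).map (fun u => PySem.List.pyGetD deg u 0) = entsF n deg j edges := by
        unfold entsF
        apply List.map_congr_left
        intro x hx
        obtain ⟨e, he, hxe⟩ := mem_rawEnts hx
        have hxr : PySem.Raise.InRange n x := by
          rcases hxe with h' | h' <;> rw [h']
          · exact (hok e he).1
          · exact (hok e he).2
        rw [pyGetD_pv _ _ _ (hdlen ▸ hxr), hdlen]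
      by_cases hz : rawEnts n j edges = []
      · simp [hz, entsF]
      · rw [if_pos (by simpa using hz), hmapeq]
    -- the inner test is exactly Nodup
    have htest : ∀ l : List Int,
        (if l = [] then true else l.length == (PySem.Set.ofList l).length) = decide l.Nodup := by
      intro l
      by_cases hl : l = []
      · subst hl; simp
      · rw [if_neg hl]
        by_cases hnod : l.Nodup
        · rw [decide_eq_true hnod, (len_ofList_eq_iff l).mpr hnod]
        · rw [decide_eq_false hnod]
          cases hx : (l.length == (PySem.Set.ofList l).length)
          · rfl
          · exact absurd ((len_ofList_eq_iff l).mp hx) hnod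
    -- A's value
    have hA : is_highly_irregular edges order =
        decide (∀ j, j < n → (entsF n deg j edges).Nodup) := by
      unfold is_highly_irregular
      rw [if_neg hne, hcnd]
      rw [if_neg (by simp [List.range_eq_nil]; omega)]
      rw [List.all_map]
      by_cases hall : ∀ j, j < n → (entsF n deg j edges).Nodup
      · rw [decide_eq_true hall]
        rw [List.all_eq_true]
        intro j hjm
        rw [Function.comp, htest]
        exact decide_eq_true (hall j (List.mem_range.mp hjm))
      · rw [decide_eq_false hall]
        obtain ⟨j, hj, hnod⟩ := by
          push Not at hall
          exact hall
        apply Bool.eq_false_iff.mpr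
        intro hcontra
        rw [List.all_eq_true] at hcontra
        have := hcontra j (List.mem_range.mpr hj)
        rw [Function.comp, htest] at this
        exact hnod (of_decide_eq_true this)
    -- B's value
    have hB : is_highly_irregular_alt edges order =
        decide (∀ j, j < n → (entsF n deg j edges).Nodup) := by
      unfold is_highly_irregular_alt
      rw [if_neg hne]
      simp only [← hn, ← hdeg]
      have hgetD : ∀ j, j < n → ((List.replicate n (PySem.Set.empty : PySem.Set Int)).getD j []) = [] := by
        intro j hj
        rw [List.getD_eq_getElem _ _ (by simpa using hj)]
        simp [PySem.Set.empty]
      have hiff := bLoop_iff n deg hdlen edges hok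
        (List.replicate n PySem.Set.empty) (by simp)
        (by intro j hj; rw [hgetD j hj]; exact List.nodup_nil)
      by_cases hall : ∀ j, j < n → (entsF n deg j edges).Nodup
      · rw [decide_eq_true hall]
        rw [hiff]
        intro j hj
        rw [hgetD j hj, List.nil_append]
        exact hall j hj
      · rw [decide_eq_false hall]
        apply Bool.eq_false_iff.mpr
        intro hcontra
        rw [hiff] at hcontra
        apply hall
        intro j hj
        have := hcontra j hj
        rwa [hgetD j hj, List.nil_append] at this
    rw [hA, hB]
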